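-- pv_equiv track=rewrite | github.com/Droggelbecher92/King-of-Tokyo | KingOfTokyo.py | add_points
-- ===== SOURCE A (Python) =====
-- def add_points(dice,active_player):
--     """Gewonnene Siegpunkte errechnen.\n
--     Zu geben: Würfelergebniss, welcher Spieler"""
--     point = 0
--     one = []
--     two = []
--     three = []
--     for num in dice:
--         if num == 1:
--             one.append("1")
--         elif num == 2:
--             two.append("1")
--         elif num == 3:
--             three.append("1")
--         else:
--             continue
--     if len(one)>=3:
--         point += (len(one)-2)
--     elif len(two)>=3:
--         point += (len(two)-1)
--     elif len(three)>=3: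
--         point += len(three)
--     return point
-- ===== SOURCE B (Python) =====
-- def add_points(dice, active_player):
--     xs = sorted(dice)
--     i = 0
--     n = len(xs)
--     while i < n:
--         j = i
--         while j < n and xs[j] == xs[i]:
--             j += 1
--         run = j - i
--         if 1 <= xs[i] <= 3 and run >= 3:
--             return run + xs[i] - 3
--         i = j
--     return 0
-- ===== Notes on version B (the rewrite author's own statement) =====
-- stated objective: alternative
-- what changed: Sorts the dice and scans runs of equal values, returning run_length + value - 3 for the first run of length >= 3 whose value is in 1..3; sorting makes the smallest qualifying value come first, which reproduces A's 1-then-2-then-3 elif priority without any per-value counters.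
import Mathlib
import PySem

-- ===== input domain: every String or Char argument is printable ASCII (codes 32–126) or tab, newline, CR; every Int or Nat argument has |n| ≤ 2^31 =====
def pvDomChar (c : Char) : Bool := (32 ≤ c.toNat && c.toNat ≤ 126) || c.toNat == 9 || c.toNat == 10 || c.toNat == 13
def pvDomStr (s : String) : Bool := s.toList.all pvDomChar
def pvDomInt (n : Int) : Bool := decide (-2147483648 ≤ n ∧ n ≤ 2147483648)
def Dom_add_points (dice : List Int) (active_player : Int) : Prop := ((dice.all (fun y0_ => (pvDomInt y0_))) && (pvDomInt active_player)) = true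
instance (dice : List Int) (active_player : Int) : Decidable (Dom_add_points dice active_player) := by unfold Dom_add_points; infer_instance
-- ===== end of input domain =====

-- B sorts the dice and scans runs of equal values (first qualifying run wins), instead of A's
-- three string-list accumulators and hardcoded elif chain; sorting puts the smallest qualifying
-- value first, reproducing A's 1-then-2-then-3 priority (objective: alternative).


-- ===== PORT A =====
def add_points (dice : List Int) (active_player : Int) : Int :=
  let point : Int := 0
  let s := dice.foldl
    (fun (acc : List String × List String × List String) num =>
      if num == 1 then (acc.1 ++ ["1"], acc.2.1, acc.2.2)
      else if num == 2 then (acc.1, acc.2.1 ++ ["1"], acc.2.2)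
      else if num == 3 then (acc.1, acc.2.1, acc.2.2 ++ ["1"])
      else acc)
    ([], [], [])
  if s.1.length ≥ 3 then point + ((s.1.length : Int) - 2)
  else if s.2.1.length ≥ 3 then point + ((s.2.1.length : Int) - 1)
  else if s.2.2.length ≥ 3 then point + (s.2.2.length : Int)
  else point

-- ===== PORT B =====
-- the outer while loop of Source B: at each step the inner while loop measures the run of
-- elements equal to the current head (takeWhile), then either returns or jumps past it (dropWhile)
def runScan : List Int → Int
  | [] => 0
  | x :: rest =>
    let run : Int := 1 + ((rest.takeWhile (fun y => y == x)).length : Int)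
    if 1 ≤ x ∧ x ≤ 3 ∧ 3 ≤ run then run + x - 3
    else runScan (rest.dropWhile (fun y => y == x))
termination_by l => l.length
decreasing_by simpa using Nat.lt_succ_of_le (List.length_dropWhile_le _ rest)

def add_points_alt (dice : List Int) (active_player : Int) : Int :=
  runScan (PySem.List.sorted dice (fun x => x) false)

-- ===== PRECONDITION & SPEC =====
def Spec_add_points (dice : List Int) (active_player : Int) (out : Int) : Prop := out = add_points_alt dice active_player
instance (dice : List Int) (active_player : Int) (out : Int) : Decidable (Spec_add_points dice active_player out) := by unfold Spec_add_points; infer_instance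

-- ===== CLAIM =====
def Claim_equal_add_points : Prop := ∀ (dice : List Int) (active_player : Int), Dom_add_points dice active_player → Spec_add_points dice active_player (add_points dice active_player)

-- ===== LEMMAS AND PROOFS =====

-- the common score as a function of the three counts
def specB (c1 c2 c3 : Nat) : Int :=
  if 3 ≤ c1 then (c1 : Int) - 2
  else if 3 ≤ c2 then (c2 : Int) - 1
  else if 3 ≤ c3 then (c3 : Int)
  else 0

theorem foldA_lengths (dice : List Int) (a b c : List String) :
    (dice.foldl
      (fun (acc : List String × List String × List String) num =>
        if num == 1 then (acc.1 ++ ["1"], acc.2.1, acc.2.2)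
        else if num == 2 then (acc.1, acc.2.1 ++ ["1"], acc.2.2)
        else if num == 3 then (acc.1, acc.2.1, acc.2.2 ++ ["1"])
        else acc)
      (a, b, c)) =
    (a ++ List.replicate (dice.count 1) "1",
     b ++ List.replicate (dice.count 2) "1",
     c ++ List.replicate (dice.count 3) "1") := by
  induction dice generalizing a b c with
  | nil => simp
  | cons x xs ih =>
    simp only [List.foldl_cons, List.count_cons]
    by_cases h1 : x = 1
    · subst h1
      show List.foldl _ (a ++ ["1"], b, c) xs = _
      rw [ih]; simp
      rw [← List.replicate_succ]
      try rw [← List.replicate_succ']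
    · by_cases h2 : x = 2
      · subst h2
        show List.foldl _ (a, b ++ ["1"], c) xs = _
        rw [ih]; simp
        rw [← List.replicate_succ]
        try rw [← List.replicate_succ']
      · by_cases h3 : x = 3
        · subst h3
          show List.foldl _ (a, b, c ++ ["1"]) xs = _
          rw [ih]; simp
          rw [← List.replicate_succ]
          try rw [← List.replicate_succ']
        · rw [if_neg (show ¬((x == 1) = true) by simp [h1]),
              if_neg (show ¬((x == 2) = true) by simp [h2]),
              if_neg (show ¬((x == 3) = true) by simp [h3]),
              if_neg (show ¬((x == 1) = true) by simp [h1]),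
              if_neg (show ¬((x == 2) = true) by simp [h2]),
              if_neg (show ¬((x == 3) = true) by simp [h3]),
              add_zero, add_zero, add_zero, ih]

theorem add_points_eq_specB (dice : List Int) (ap : Int) :
    add_points dice ap = specB (dice.count 1) (dice.count 2) (dice.count 3) := by
  unfold add_points specB
  simp only [foldA_lengths, List.nil_append, List.length_replicate, ge_iff_le, zero_add]

-- after sorting, every element below the current head is gone: the tail past a run is strictly larger
theorem dropWhile_gt (x : Int) : ∀ (l : List Int), (∀ y ∈ l, x ≤ y) → l.Pairwise (· ≤ ·) →
    ∀ y ∈ l.dropWhile (fun y => y == x), x < y := by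
  intro l
  induction l with
  | nil => simp
  | cons a t ih =>
    intro hle hpw y hy
    by_cases ha : a = x
    · rw [List.dropWhile_cons, if_pos (by simp [ha])] at hy
      exact ih (fun z hz => hle z (by simp [hz])) (List.pairwise_cons.mp hpw).2 y hy
    · rw [List.dropWhile_cons, if_neg (by simp [ha])] at hy
      have hxa : x < a := lt_of_le_of_ne (hle a (by simp)) (Ne.symm ha)
      rcases List.mem_cons.mp hy with hya | hyt
      · omega
      · exact lt_of_lt_of_le hxa ((List.pairwise_cons.mp hpw).1 y hyt)

-- the count bookkeeping for one step of the run scan on a sorted list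
theorem run_facts (x : Int) (rest : List Int) (h : (x :: rest).Pairwise (· ≤ ·)) :
    (x :: rest).count x = 1 + (rest.takeWhile (fun y => y == x)).length ∧
    (∀ v : Int, v ≠ x → (x :: rest).count v = (rest.dropWhile (fun y => y == x)).count v) ∧
    (∀ v : Int, v ≤ x → (rest.dropWhile (fun y => y == x)).count v = 0) ∧
    (rest.dropWhile (fun y => y == x)).Pairwise (· ≤ ·) := by
  obtain ⟨hle, hrest⟩ := List.pairwise_cons.mp h
  have hdgt : ∀ y ∈ rest.dropWhile (fun y => y == x), x < y := dropWhile_gt x rest hle hrest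
  have hpx : ∀ y ∈ rest.takeWhile (fun y => y == x), y = x :=
    fun y hy => by simpa using List.mem_takeWhile_imp hy
  have hsplit : rest.takeWhile (fun y => y == x) ++ rest.dropWhile (fun y => y == x) = rest :=
    List.takeWhile_append_dropWhile
  have hcnt : ∀ v : Int, rest.count v =
      (rest.takeWhile (fun y => y == x)).count v + (rest.dropWhile (fun y => y == x)).count v := by
    intro v
    conv_lhs => rw [← hsplit]
    exact List.count_append ..
  refine ⟨?_, ?_, ?_, ?_⟩
  · have hdx : (rest.dropWhile (fun y => y == x)).count x = 0 :=
      List.count_eq_zero.mpr (fun hx => lt_irrefl x (hdgt x hx))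
    have hpc : (rest.takeWhile (fun y => y == x)).count x =
        (rest.takeWhile (fun y => y == x)).length :=
      List.count_eq_length.mpr (fun b hb => (hpx b hb).symm)
    rw [List.count_cons_self, hcnt, hdx, hpc]
    omega
  · intro v hv
    have hpv : (rest.takeWhile (fun y => y == x)).count v = 0 :=
      List.count_eq_zero.mpr (fun hmem => hv (hpx v hmem))
    have hcons : (x :: rest).count v = rest.count v := by
      simp [List.count_cons, hv, Ne.symm hv]
    rw [hcons, hcnt, hpv, Nat.zero_add]
  · intro v hv
    exact List.count_eq_zero.mpr (fun hmem => absurd (hdgt v hmem) (by omega))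
  · exact List.Pairwise.sublist (List.dropWhile_sublist _) hrest

-- on a sorted list, the run scan computes specB of the counts of 1, 2, 3
theorem runScan_sorted (l : List Int) (h : l.Pairwise (· ≤ ·)) :
    runScan l = specB (l.count 1) (l.count 2) (l.count 3) := by
  induction l using runScan.induct with
  | case1 => simp [runScan, specB]
  | case2 x rest run hc =>
    obtain ⟨hx1, hx3, hr⟩ := hc
    obtain ⟨hcx, hcv, hdz, hdpw⟩ := run_facts x rest h
    simp only [runScan]
    rw [if_pos ⟨hx1, hx3, hr⟩]
    have hrn : (3 : Int) ≤ 1 + ((rest.takeWhile (fun y => y == x)).length : Int) := hr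
    interval_cases x
    · simp only [specB, hcx]
      split_ifs <;> push_cast <;> omega
    · simp only [specB, hcx, hcv 1 (by norm_num), hdz 1 (by norm_num)]
      split_ifs <;> push_cast <;> omega
    · simp only [specB, hcx, hcv 1 (by norm_num), hdz 1 (by norm_num),
        hcv 2 (by norm_num), hdz 2 (by norm_num)]
      split_ifs <;> push_cast <;> omega
  | case3 x rest run hneg ih =>
    obtain ⟨hcx, hcv, hdz, hdpw⟩ := run_facts x rest h
    simp only [runScan]
    rw [if_neg hneg, ih hdpw]
    by_cases hx1 : x = 1
    · subst hx1
      have hrn : ¬ (3 : Int) ≤ 1 + ((rest.takeWhile (fun y => y == (1:Int))).length : Int) :=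
        fun hh => hneg ⟨by omega, by omega, hh⟩
      simp only [specB, hcx, hdz 1 (by omega), hcv 2 (by norm_num), hcv 3 (by norm_num)]
      split_ifs <;> push_cast <;> omega
    · by_cases hx2 : x = 2
      · subst hx2
        have hrn : ¬ (3 : Int) ≤ 1 + ((rest.takeWhile (fun y => y == (2:Int))).length : Int) :=
          fun hh => hneg ⟨by omega, by omega, hh⟩
        simp only [specB, hcx, hcv 1 (by norm_num), hdz 1 (by norm_num), hdz 2 (by omega),
          hcv 3 (by norm_num)]
        split_ifs <;> push_cast <;> omega
      · by_cases hx3 : x = 3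
        · subst hx3
          have hrn : ¬ (3 : Int) ≤ 1 + ((rest.takeWhile (fun y => y == (3:Int))).length : Int) :=
            fun hh => hneg ⟨by omega, by omega, hh⟩
          simp only [specB, hcx, hcv 1 (by norm_num), hdz 1 (by omega), hcv 2 (by norm_num),
            hdz 2 (by omega), hdz 3 (by omega)]
          split_ifs <;> push_cast <;> omega
        · rw [hcv 1 (Ne.symm hx1), hcv 2 (Ne.symm hx2), hcv 3 (Ne.symm hx3)]

-- ===== VERDICT =====
theorem add_points_spec : Claim_equal_add_points := by
  intro dice active_player _
  unfold Spec_add_points add_points_alt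
  rw [add_points_eq_specB,
    runScan_sorted _ (by simpa using PySem.List.sorted_pairwise dice (fun x => x))]
  have hp := PySem.List.sorted_perm dice (fun x => x) false
  rw [hp.count_eq, hp.count_eq, hp.count_eq]
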